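-- pv_equiv track=rewrite | github.com/Rafin010/FreeDownloader | yt_d/app.py | _is_unrecoverable_error
-- ===== SOURCE A (Python) =====
-- def _is_unrecoverable_error(error_str):
--     """Check if an error is truly unrecoverable and should NOT be retried."""
--     unrecoverable = [
--         'is not a valid url',
--         'private video',
--         'video unavailable',
--         'this video has been removed',
--         'copyright',
--         'this video is no longer available',
--     ]
--     error_lower = error_str.lower()
--     return any(pattern in error_lower for pattern in unrecoverable)
-- ===== SOURCE B (Python) =====
-- def _is_unrecoverable_error(error_str):
--     """Check if an error is truly unrecoverable and should NOT be retried."""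
--     patterns = (
--         'is not a valid url',
--         'private video',
--         'video unavailable',
--         'this video has been removed',
--         'copyright',
--         'this video is no longer available',
--     )
--     s = error_str.lower()
--     # single left-to-right pass: at each position test whether some pattern starts there
--     for i in range(len(s) + 1):
--         for p in patterns:
--             if s.startswith(p, i):
--                 return True
--     return False
-- ===== Notes on version B (the rewrite author's own statement) =====
-- stated objective: alternative
-- what changed: Replaces six independent substring searches ('pattern in s' per pattern) by one left-to-right scan over the lowered string that tests at each position whether any pattern starts there (a single-pass multi-pattern matcher in the style of a regex alternation).
import Mathlib
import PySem

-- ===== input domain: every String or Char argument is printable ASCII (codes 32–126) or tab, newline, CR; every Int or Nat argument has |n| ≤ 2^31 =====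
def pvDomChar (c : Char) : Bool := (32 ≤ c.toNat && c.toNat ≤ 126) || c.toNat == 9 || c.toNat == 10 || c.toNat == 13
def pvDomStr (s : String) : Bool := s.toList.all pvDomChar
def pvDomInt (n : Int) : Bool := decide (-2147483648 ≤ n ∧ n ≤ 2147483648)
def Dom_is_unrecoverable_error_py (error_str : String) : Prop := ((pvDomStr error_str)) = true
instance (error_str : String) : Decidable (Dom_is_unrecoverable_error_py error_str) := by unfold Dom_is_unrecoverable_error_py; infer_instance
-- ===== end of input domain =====

-- B replaces six per-pattern substring scans by one left-to-right pass testing each position once (alternative, not faster).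

-- ===== PORT A =====
def is_unrecoverable_error_py (error_str : String) : Bool :=
  let unrecoverable : List String :=
    ["is not a valid url", "private video", "video unavailable",
     "this video has been removed", "copyright", "this video is no longer available"]
  let error_lower := PySem.Str.lower error_str
  unrecoverable.any (fun pattern => PySem.Str.isIn pattern error_lower)

-- ===== PORT B =====
-- the six patterns as character lists (B compares character-wise via startswith at a position)
def pvPatsB : List (List Char) :=
  ["is not a valid url", "private video", "video unavailable",
   "this video has been removed", "copyright", "this video is no longer available"].map String.toList

-- the loop of Source B: for each position i (i.e. each suffix of s, including the empty one),
-- return True as soon as some pattern starts there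
def pvScanB (s : List Char) : Bool :=
  if pvPatsB.any (fun p => p.isPrefixOf s) then true
  else
    match s with
    | [] => false
    | _ :: t => pvScanB t

def is_unrecoverable_error_py_alt (error_str : String) : Bool :=
  pvScanB (PySem.Str.lower error_str).toList

-- ===== PRECONDITION & SPEC =====
def Spec_is_unrecoverable_error_py (error_str : String) (out : Bool) : Prop := out = is_unrecoverable_error_py_alt error_str
instance (error_str : String) (out : Bool) : Decidable (Spec_is_unrecoverable_error_py error_str out) := by unfold Spec_is_unrecoverable_error_py; infer_instance

-- ===== CLAIM (what is proved, stated in full; the proofs are below) =====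
def Claim_equal_is_unrecoverable_error_py : Prop := ∀ (error_str : String), Dom_is_unrecoverable_error_py error_str → Spec_is_unrecoverable_error_py error_str (is_unrecoverable_error_py error_str)

-- ===== LEMMAS AND PROOFS =====

-- B's scan finds a pattern iff some pattern is an infix of s
theorem pvScanB_iff (s : List Char) :
    pvScanB s = true ↔ ∃ p ∈ pvPatsB, p <:+: s := by
  induction s with
  | nil =>
    rw [pvScanB]
    simp [List.any_eq_true, List.isPrefixOf_iff_prefix]
  | cons c t ih =>
    rw [pvScanB]
    by_cases h : pvPatsB.any (fun p => p.isPrefixOf (c :: t)) = true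
    · rw [if_pos h]
      simp only [true_iff]
      rcases List.any_eq_true.mp h with ⟨p, hp, hpre⟩
      exact ⟨p, hp, (List.isPrefixOf_iff_prefix.mp hpre).isInfix⟩
    · rw [if_neg h]
      rw [ih]
      constructor
      · rintro ⟨p, hp, hinf⟩
        exact ⟨p, hp, List.infix_cons hinf⟩
      · rintro ⟨p, hp, hinf⟩
        rcases (List.infix_cons_iff).mp hinf with hpre | hinf'
        · refine absurd ?_ h
          exact List.any_eq_true.mpr ⟨p, hp, List.isPrefixOf_iff_prefix.mpr hpre⟩
        · exact ⟨p, hp, hinf'⟩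

-- ===== VERDICT (by name: the statement is the Claim_ definition above) =====
theorem is_unrecoverable_error_py_spec : Claim_equal_is_unrecoverable_error_py := by
  intro error_str _
  unfold Spec_is_unrecoverable_error_py is_unrecoverable_error_py is_unrecoverable_error_py_alt
  rw [Bool.eq_iff_iff, pvScanB_iff]
  simp only [List.any_eq_true, PySem.Str.isIn_eq, PySem.Chars.isIn_iff_infix]
  constructor
  · rintro ⟨p, hp, hinf⟩
    refine ⟨p.toList, ?_, hinf⟩
    simp only [pvPatsB, List.mem_map]
    exact ⟨p, hp, rfl⟩
  · rintro ⟨q, hq, hinf⟩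
    simp only [pvPatsB, List.mem_map] at hq
    rcases hq with ⟨p, hp, rfl⟩
    exact ⟨p, hp, hinf⟩
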